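-- pv_equiv track=rewrite | github.com/acb16ua/COM3610-dissertation-project-td | reidl_td_simple.py | DFSTree
-- ===== SOURCE A (Python) =====
-- def DFSTree(G, v=None):
--     if v is None:
--         nodes = G
--     else:
--         nodes = [v]
--     visited=set()
--     for start in nodes:
--         if start in visited:
--             continue
--         visited.add(start)
--         stack = [(start,iter(G[start]))]
--         while stack:
--             parent,children = stack[-1]
--             try:
--                 child = next(children)
--                 if child not in visited:
--                     yield parent,child
--                     visited.add(child)
--                     stack.append((child,iter(G[child])))
--             except StopIteration:
--                 stack.pop()
-- ===== SOURCE B (Python) =====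
-- def DFSTree(G, v=None):
--     visited = set()
--
--     def dfs(parent):
--         for child in G[parent]:
--             if child not in visited:
--                 visited.add(child)
--                 yield (parent, child)
--                 yield from dfs(child)
--
--     for start in (G if v is None else [v]):
--         if start not in visited:
--             visited.add(start)
--             yield from dfs(start)
-- ===== Notes on version B (the rewrite author's own statement) =====
-- stated objective: simpler
-- what changed: Replaces A's explicit (node, iterator) stack and while-loop with a recursive generator dfs(parent) that yields (parent, child) and recurses, sharing a visited set; edges come out in the same DFS preorder.
import Mathlib
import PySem

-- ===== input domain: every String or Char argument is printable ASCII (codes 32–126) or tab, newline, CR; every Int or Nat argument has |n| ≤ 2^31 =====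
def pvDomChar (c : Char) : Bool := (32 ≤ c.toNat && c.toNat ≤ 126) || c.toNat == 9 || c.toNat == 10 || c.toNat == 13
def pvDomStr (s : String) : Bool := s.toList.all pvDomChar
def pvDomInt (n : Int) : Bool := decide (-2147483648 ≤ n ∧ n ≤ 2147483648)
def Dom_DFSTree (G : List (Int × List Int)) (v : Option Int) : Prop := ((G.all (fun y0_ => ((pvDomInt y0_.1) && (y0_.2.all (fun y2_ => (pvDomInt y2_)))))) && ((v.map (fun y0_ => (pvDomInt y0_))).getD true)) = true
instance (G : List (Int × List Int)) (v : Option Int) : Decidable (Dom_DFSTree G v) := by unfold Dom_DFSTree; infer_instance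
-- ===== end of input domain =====

-- B replaces A's explicit (node, iterator) stack with a recursive DFS helper (simpler, same
-- DFS preorder and cost); the generators are compared by the list of edges they yield.

-- G[x]: first-match association-list lookup (Python dict indexing); the [] default stands in
-- for the KeyError case, which Pre_DFSTree excludes.
def pvAdj (G : List (Int × List Int)) (c : Int) : List Int :=
  (PySem.Dict.mk G).getD c []

-- nodes that can ever enter `visited`: the keys and every adjacency entry
def pvUniv (G : List (Int × List Int)) : List Int :=
  G.map Prod.fst ++ (G.map Prod.snd).flatten

-- number of universe nodes not yet visited (termination measure of both ports)
def pvMu (G : List (Int × List Int)) (visited : PySem.Set Int) : Nat :=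
  ((pvUniv G).filter (fun x => !(PySem.Set.contains visited x))).length

-- ---- facts the ports' termination proofs cite (so they live above the ports) ----
theorem pvAdj_cons (k c : Int) (vs : List Int) (t : List (Int × List Int)) :
    pvAdj ((k, vs) :: t) c = if k == c then vs else pvAdj t c := by
  unfold pvAdj
  rw [PySem.Dict.getD_eq_get?_getD, PySem.Dict.getD_eq_get?_getD, PySem.Dict.get?_mk_cons]
  split <;> rfl

theorem pvAdj_eq_nil_of_not_key (G : List (Int × List Int)) (c : Int)
    (h : c ∉ G.map Prod.fst) : pvAdj G c = [] := by
  induction G with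
  | nil => rfl
  | cons p t ih =>
    obtain ⟨k, vs⟩ := p
    simp only [List.map_cons, List.mem_cons, not_or] at h
    rw [pvAdj_cons, if_neg (by simp only [beq_iff_eq]; exact fun h' => h.1 h'.symm)]
    exact ih h.2

theorem pv_countP_lt {α : Type} (l : List α) (p q : α → Bool)
    (himp : ∀ a, p a = true → q a = true) (c : α) (hc : c ∈ l)
    (hq : q c = true) (hp : p c = false) : l.countP p < l.countP q := by
  induction l with
  | nil => cases hc
  | cons x t ih =>
    have hmono := List.countP_mono_left (l := t) (p := p) (q := q) (fun a _ h => himp a h)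
    rw [List.mem_cons] at hc
    rcases hc with rfl | hc
    · rw [List.countP_cons, List.countP_cons, hp, hq]; simp; omega
    · have := ih hc
      rw [List.countP_cons, List.countP_cons]
      have h2 : (if p x = true then 1 else 0) ≤ (if q x = true then 1 else 0) := by
        by_cases hx : p x = true
        · simp [hx, himp x hx]
        · simp [hx]
      split_ifs at * <;> omega

theorem pvMu_add_lt (G : List (Int × List Int)) (v : PySem.Set Int) (c : Int)
    (hU : c ∈ pvUniv G) (hv : c ∉ v) : pvMu G (PySem.Set.add v c) < pvMu G v := by
  unfold pvMu
  rw [← List.countP_eq_length_filter, ← List.countP_eq_length_filter]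
  apply pv_countP_lt _ _ _ _ c hU
  · simp [hv]
  · simp [PySem.Set.mem_add]
  · intro a
    simp only [PySem.Set.contains_eq_listContains, Bool.not_eq_eq_eq_not, Bool.not_true,
      List.contains_eq_mem, decide_eq_false_iff_not, PySem.Set.mem_add]
    tauto

theorem pvMu_add_eq_of_not_univ (G : List (Int × List Int)) (v : PySem.Set Int) (c : Int)
    (hU : c ∉ pvUniv G) : pvMu G (PySem.Set.add v c) = pvMu G v := by
  unfold pvMu
  congr 1
  apply List.filter_congr
  intro x hx
  have hxc : x ≠ c := fun h => hU (h ▸ hx)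
  simp [PySem.Set.contains_eq_listContains, List.contains_eq_mem, PySem.Set.mem_add, hxc]

-- ===== PORT A =====
-- A's while-loop over the explicit stack (top of the Python list = head here); it returns the
-- yielded edges together with the final visited set, which is threaded across the starts.
def aLoop (G : List (Int × List Int)) (visited : PySem.Set Int)
    (stack : List (Int × List Int)) : List (Int × Int) × PySem.Set Int :=
  match stack with
  | [] => ([], visited)
  | (parent, children) :: rest =>
    match children with
    | [] => aLoop G visited rest                                   -- StopIteration: stack.pop()
    | c :: cs =>
      if PySem.Set.contains visited c then
        aLoop G visited ((parent, cs) :: rest)                     -- child already visited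
      else
        let r := aLoop G (PySem.Set.add visited c) ((c, pvAdj G c) :: (parent, cs) :: rest)
        ((parent, c) :: r.1, r.2)                                  -- yield, mark, push
  termination_by (pvMu G visited, 2 * (stack.map (fun p => p.2.length)).sum + stack.length)
  decreasing_by
  · apply Prod.Lex.right; simp only [List.map_cons, List.sum_cons, List.length_cons, List.length_nil]; omega
  · apply Prod.Lex.right; simp only [List.map_cons, List.sum_cons, List.length_cons]; omega
  · rename_i hvis
    have hv : c ∉ visited := fun hm => hvis (by simpa using hm)
    by_cases hU : c ∈ pvUniv G
    · exact Prod.Lex.left _ _ (pvMu_add_lt G visited c hU hv)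
    · rw [pvMu_add_eq_of_not_univ G visited c hU]
      apply Prod.Lex.right
      rw [pvAdj_eq_nil_of_not_key G c (fun hk => hU (by simp [pvUniv, hk]))]
      simp only [List.map_cons, List.sum_cons, List.length_cons, List.length_nil]
      omega

def DFSTree (G : List (Int × List Int)) (v : Option Int) : List (Int × Int) :=
  let nodes := match v with
    | none => G.map Prod.fst                                       -- nodes = G (dict iteration)
    | some u => [u]                                                -- nodes = [v]
  (nodes.foldl (fun acc start =>
      if PySem.Set.contains acc.2 start then acc                   -- continue
      else
        let r := aLoop G (PySem.Set.add acc.2 start) [(start, pvAdj G start)]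
        (acc.1 ++ r.1, r.2))
    (([] : List (Int × Int)), (PySem.Set.empty : PySem.Set Int))).1

-- ===== PORT B =====
-- B's recursive generator dfs(parent): for child in G[parent], yield (parent, child), recurse.
-- `fuel` only guards termination; with fuel ≥ pvMu G visited the 0-branch is never reached
-- (bDfs_fuel_irrel below), and the driver passes (pvUniv G).length ≥ pvMu.  Python B has no fuel.
def bDfs (fuel : Nat) (G : List (Int × List Int)) (parent : Int)
    (children : List Int) (visited : PySem.Set Int) : List (Int × Int) × PySem.Set Int :=
  match children with
  | [] => ([], visited)
  | c :: cs =>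
    if PySem.Set.contains visited c then
      bDfs fuel G parent cs visited
    else
      let r1 := match fuel with
        | 0 => (([] : List (Int × Int)), PySem.Set.add visited c)  -- termination guard (dead)
        | f + 1 => bDfs f G c (pvAdj G c) (PySem.Set.add visited c)  -- yield from dfs(child)
      let r2 := bDfs fuel G parent cs r1.2                         -- remaining siblings
      ((parent, c) :: r1.1 ++ r2.1, r2.2)                          -- yield (parent, child) first
  termination_by (fuel, children.length)
  decreasing_by
  · apply Prod.Lex.right; simp
  · apply Prod.Lex.left; omega
  · apply Prod.Lex.right; simp

def DFSTree_alt (G : List (Int × List Int)) (v : Option Int) : List (Int × Int) :=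
  let nodes := match v with
    | none => G.map Prod.fst
    | some u => [u]
  (nodes.foldl (fun acc start =>
      if PySem.Set.contains acc.2 start then acc
      else
        let r := bDfs (pvUniv G).length G start (pvAdj G start) (PySem.Set.add acc.2 start)
        (acc.1 ++ r.1, r.2))
    (([] : List (Int × Int)), (PySem.Set.empty : PySem.Set Int))).1

-- ===== PRECONDITION & SPEC =====
-- Pre_ is exactly the inputs on which the Python returns normally (no KeyError): with v=None every
-- adjacency entry must be a key; with v given, v and every node reachable from it must be keys.
-- pvReach saturates the successor relation (|universe|+1 rounds reach the fixpoint).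
def pvReachStep (G : List (Int × List Int)) (R : PySem.Set Int) : PySem.Set Int :=
  PySem.Set.update R ((G.filter (fun p => decide (p.1 ∈ R))).map Prod.snd).flatten

def pvReach (G : List (Int × List Int)) (u : Int) : PySem.Set Int :=
  (pvReachStep G)^[(pvUniv G).length + 1] (PySem.Set.add PySem.Set.empty u)

def Pre_DFSTree (G : List (Int × List Int)) (v : Option Int) : Prop :=
  (v = none → ∀ p ∈ G, ∀ c ∈ p.2, c ∈ G.map Prod.fst) ∧
  (∀ u, v = some u → u ∈ G.map Prod.fst ∧ ∀ x ∈ pvReach G u, x ∈ G.map Prod.fst)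
instance (G : List (Int × List Int)) (v : Option Int) : Decidable (Pre_DFSTree G v) := by
  unfold Pre_DFSTree; infer_instance

def pvWitness_DFSTree : (List (Int × List Int)) × Option Int :=
  ([(0, [1, 2]), (1, [0]), (2, [])], none)

def Spec_DFSTree (G : List (Int × List Int)) (v : Option Int) (out : List (Int × Int)) : Prop := out = DFSTree_alt G v
instance (G : List (Int × List Int)) (v : Option Int) (out : List (Int × Int)) : Decidable (Spec_DFSTree G v out) := by unfold Spec_DFSTree; infer_instance

-- ===== CLAIM (what is proved, stated in full; the proofs are below) =====
def Claim_equal_DFSTree : Prop := ∀ (G : List (Int × List Int)) (v : Option Int), Dom_DFSTree G v → Pre_DFSTree G v → Spec_DFSTree G v (DFSTree G v)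

-- ===== LEMMAS AND PROOFS =====

theorem pvMu_antitone (G : List (Int × List Int)) (v w : PySem.Set Int)
    (h : ∀ x, x ∈ v → x ∈ w) : pvMu G w ≤ pvMu G v := by
  unfold pvMu
  rw [← List.countP_eq_length_filter, ← List.countP_eq_length_filter]
  apply List.countP_mono_left
  intro a _ ha
  simp only [PySem.Set.contains_eq_listContains, Bool.not_eq_eq_eq_not, Bool.not_true,
    List.contains_eq_mem, decide_eq_false_iff_not] at *
  exact fun hm => ha (h a hm)

theorem pvMu_add_le (G : List (Int × List Int)) (v : PySem.Set Int) (c : Int) :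
    pvMu G (PySem.Set.add v c) ≤ pvMu G v := by
  apply pvMu_antitone; intro x hx; rw [PySem.Set.mem_add]; exact Or.inl hx

theorem pvMu_pos (G : List (Int × List Int)) (v : PySem.Set Int) (c : Int)
    (hU : c ∈ pvUniv G) (hv : c ∉ v) : 1 ≤ pvMu G v := by
  have hmem : c ∈ (pvUniv G).filter (fun x => !(PySem.Set.contains v x)) :=
    List.mem_filter.2 ⟨hU, by simp [hv]⟩
  have := List.length_pos_of_mem hmem
  unfold pvMu; omega

theorem pvMu_le_univ (G : List (Int × List Int)) (v : PySem.Set Int) :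
    pvMu G v ≤ (pvUniv G).length := List.length_filter_le _ _

-- equation lemmas for bDfs (its functional induction principle is not available)
theorem bDfs_nil (fuel : Nat) (G : List (Int × List Int)) (parent : Int) (visited : PySem.Set Int) :
    bDfs fuel G parent [] visited = ([], visited) := by simp [bDfs]

theorem bDfs_cons_mem (fuel : Nat) (G : List (Int × List Int)) (parent c : Int) (cs : List Int)
    (visited : PySem.Set Int) (h : c ∈ visited) :
    bDfs fuel G parent (c :: cs) visited = bDfs fuel G parent cs visited := by
  rw [bDfs.eq_def]; simp [h]

theorem bDfs_cons_zero (G : List (Int × List Int)) (parent c : Int) (cs : List Int)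
    (visited : PySem.Set Int) (h : c ∉ visited) :
    bDfs 0 G parent (c :: cs) visited =
      ((parent, c) :: (bDfs 0 G parent cs (PySem.Set.add visited c)).1,
        (bDfs 0 G parent cs (PySem.Set.add visited c)).2) := by
  rw [bDfs.eq_def]; simp [h]

theorem bDfs_cons_succ (f : Nat) (G : List (Int × List Int)) (parent c : Int) (cs : List Int)
    (visited : PySem.Set Int) (h : c ∉ visited) :
    bDfs (f + 1) G parent (c :: cs) visited =
      ((parent, c) :: (bDfs f G c (pvAdj G c) (PySem.Set.add visited c)).1
          ++ (bDfs (f + 1) G parent cs (bDfs f G c (pvAdj G c) (PySem.Set.add visited c)).2).1,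
        (bDfs (f + 1) G parent cs (bDfs f G c (pvAdj G c) (PySem.Set.add visited c)).2).2) := by
  rw [bDfs.eq_def]; simp [h]

-- when the child is not a key its adjacency list is empty and the fuel does not matter
theorem bDfs_cons_notU (fuel : Nat) (G : List (Int × List Int)) (parent c : Int) (cs : List Int)
    (visited : PySem.Set Int) (h : c ∉ visited) (hadj : pvAdj G c = []) :
    bDfs fuel G parent (c :: cs) visited =
      ((parent, c) :: (bDfs fuel G parent cs (PySem.Set.add visited c)).1,
        (bDfs fuel G parent cs (PySem.Set.add visited c)).2) := by
  cases fuel with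
  | zero => exact bDfs_cons_zero G parent c cs visited h
  | succ f => rw [bDfs_cons_succ f G parent c cs visited h, hadj, bDfs_nil]; simp

theorem bDfs_mono (fuel : Nat) (G : List (Int × List Int)) (parent : Int)
    (children : List Int) (visited : PySem.Set Int) :
    ∀ x, x ∈ visited → x ∈ (bDfs fuel G parent children visited).2 := by
  induction fuel using Nat.strong_induction_on generalizing parent children visited with
  | _ fuel ihf =>
    induction children generalizing visited with
    | nil => intro x hx; rw [bDfs_nil]; exact hx
    | cons c cs ihc =>
      intro x hx
      by_cases hc : c ∈ visited
      · rw [bDfs_cons_mem _ _ _ _ _ _ hc]; exact ihc _ x hx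
      · have hx' : x ∈ PySem.Set.add visited c := by rw [PySem.Set.mem_add]; exact Or.inl hx
        cases fuel with
        | zero => rw [bDfs_cons_zero _ _ _ _ _ hc]; exact ihc _ x hx'
        | succ f =>
          rw [bDfs_cons_succ _ _ _ _ _ _ hc]
          exact ihc _ x (ihf f (by omega) _ _ _ x hx')

theorem pvMu_bDfs_le (fuel : Nat) (G : List (Int × List Int)) (parent : Int)
    (children : List Int) (visited : PySem.Set Int) :
    pvMu G (bDfs fuel G parent children visited).2 ≤ pvMu G visited :=
  pvMu_antitone G visited _ (bDfs_mono fuel G parent children visited)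

-- with enough fuel (≥ pvMu) bDfs does not depend on the exact fuel value
theorem bDfs_fuel_irrel (G : List (Int × List Int)) : ∀ (f1 f2 : Nat) (parent : Int)
    (children : List Int) (visited : PySem.Set Int),
    pvMu G visited ≤ f1 → pvMu G visited ≤ f2 →
    bDfs f1 G parent children visited = bDfs f2 G parent children visited := by
  intro f1
  induction f1 using Nat.strong_induction_on with
  | _ f1 ihf =>
    intro f2 parent children
    induction children with
    | nil => intro visited _ _; rw [bDfs_nil, bDfs_nil]
    | cons c cs ihc =>
      intro visited h1 h2
      by_cases hc : c ∈ visited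
      · rw [bDfs_cons_mem _ _ _ _ _ _ hc, bDfs_cons_mem _ _ _ _ _ _ hc]
        exact ihc visited h1 h2
      · by_cases hU : c ∈ pvUniv G
        · have hpos := pvMu_pos G visited c hU hc
          have hlt := pvMu_add_lt G visited c hU hc
          cases f1 with
          | zero => omega
          | succ g1 =>
            cases f2 with
            | zero => omega
            | succ g2 =>
              rw [bDfs_cons_succ _ _ _ _ _ _ hc, bDfs_cons_succ _ _ _ _ _ _ hc]
              have hch : bDfs g1 G c (pvAdj G c) (PySem.Set.add visited c)
                  = bDfs g2 G c (pvAdj G c) (PySem.Set.add visited c) :=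
                ihf g1 (by omega) g2 c _ _ (by omega) (by omega)
              rw [hch]
              have hw := pvMu_bDfs_le g2 G c (pvAdj G c) (PySem.Set.add visited c)
              have hadd := pvMu_add_le G visited c
              rw [ihc _ (by omega) (by omega)]
        · have hadj : pvAdj G c = [] :=
            pvAdj_eq_nil_of_not_key G c (fun hk => hU (by simp [pvUniv, hk]))
          rw [bDfs_cons_notU _ _ _ _ _ _ hc hadj, bDfs_cons_notU _ _ _ _ _ _ hc hadj]
          have heq := pvMu_add_eq_of_not_univ G visited c hU
          rw [ihc _ (by omega) (by omega)]

-- A's stack, interpreted frame by frame through B's recursive dfs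
def stackRun (fuel : Nat) (G : List (Int × List Int)) :
    PySem.Set Int → List (Int × List Int) → List (Int × Int) × PySem.Set Int
  | visited, [] => ([], visited)
  | visited, (p, cs) :: rest =>
    let r := bDfs fuel G p cs visited
    let r2 := stackRun fuel G r.2 rest
    (r.1 ++ r2.1, r2.2)

theorem aLoop_eq_stackRun (G : List (Int × List Int)) (visited : PySem.Set Int)
    (stack : List (Int × List Int)) :
    ∀ fuel, pvMu G visited ≤ fuel → aLoop G visited stack = stackRun fuel G visited stack := by
  fun_induction aLoop G visited stack with
  | case1 visited =>
    intro fuel _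
    rfl
  | case2 visited parent rest ih =>
    intro fuel hf
    rw [ih fuel hf]
    simp [stackRun, bDfs_nil]
  | case3 visited parent rest c cs hvis ih =>
    intro fuel hf
    have hc : c ∈ visited := by simpa using hvis
    rw [ih fuel hf]
    simp only [stackRun, bDfs_cons_mem fuel G parent c cs visited hc]
  | case4 visited parent rest c cs hvis r ih =>
    intro fuel hf
    have hc : c ∉ visited := by simpa using hvis
    have hadd := pvMu_add_le G visited c
    have hr : r = stackRun fuel G (PySem.Set.add visited c) ((c, pvAdj G c) :: (parent, cs) :: rest) :=
      ih fuel (le_trans hadd hf)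
    rw [hr]
    by_cases hU : c ∈ pvUniv G
    · have hpos := pvMu_pos G visited c hU hc
      have hlt := pvMu_add_lt G visited c hU hc
      cases fuel with
      | zero => omega
      | succ f =>
        have hch : bDfs f G c (pvAdj G c) (PySem.Set.add visited c)
            = bDfs (f + 1) G c (pvAdj G c) (PySem.Set.add visited c) :=
          bDfs_fuel_irrel G f (f + 1) c _ _ (by omega) (by omega)
        simp only [stackRun, bDfs_cons_succ f G parent c cs visited hc, ← hch]
        simp [List.append_assoc]
    · have hadj : pvAdj G c = [] :=
        pvAdj_eq_nil_of_not_key G c (fun hk => hU (by simp [pvUniv, hk]))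
      simp only [stackRun, bDfs_cons_notU fuel G parent c cs visited hc hadj, hadj, bDfs_nil]
      simp

-- per-start step: one aLoop call from a fresh start equals one bDfs call
theorem step_eq (G : List (Int × List Int)) (acc : List (Int × Int) × PySem.Set Int) (s : Int) :
    (if PySem.Set.contains acc.2 s then acc
     else
       let r := aLoop G (PySem.Set.add acc.2 s) [(s, pvAdj G s)]
       (acc.1 ++ r.1, r.2))
    = (if PySem.Set.contains acc.2 s then acc
       else
         let r := bDfs (pvUniv G).length G s (pvAdj G s) (PySem.Set.add acc.2 s)
         (acc.1 ++ r.1, r.2)) := by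
  split
  · rfl
  · show (acc.1 ++ (aLoop G (PySem.Set.add acc.2 s) [(s, pvAdj G s)]).1,
        (aLoop G (PySem.Set.add acc.2 s) [(s, pvAdj G s)]).2)
      = (acc.1 ++ (bDfs (pvUniv G).length G s (pvAdj G s) (PySem.Set.add acc.2 s)).1,
        (bDfs (pvUniv G).length G s (pvAdj G s) (PySem.Set.add acc.2 s)).2)
    rw [aLoop_eq_stackRun G _ _ _ (le_trans (pvMu_add_le G acc.2 s) (pvMu_le_univ G acc.2))]
    simp [stackRun]

-- ===== VERDICT (by name: the statement is the Claim_ definition above) =====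
theorem DFSTree_spec : Claim_equal_DFSTree := by
  intro G v _ _
  unfold Spec_DFSTree DFSTree DFSTree_alt
  cases v with
  | none => exact congrArg Prod.fst (PySem.List.foldl_congr_mem _ _ _ _ (fun acc x _ => step_eq G acc x))
  | some u => exact congrArg Prod.fst (PySem.List.foldl_congr_mem _ _ _ _ (fun acc x _ => step_eq G acc x))
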